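-- pv_equiv track=rewrite | github.com/lucgr/RepoScope | backend/services/dependency_service.py | _find_mismatches
-- ===== SOURCE A (Python) =====
-- from typing import List, Dict, Any, Tuple
--
-- def _find_mismatches(repo_deps: List[Tuple[str, Dict[str, str]]]) -> Dict[str, Dict[str, List[str]]]:
--     """Find dependency version mismatches across repositories.
--     Returns a dictionary of dependency mismatches
--     """
--     # First, collect all unique dependencies across repos
--     all_dependencies = set()
--     for _, deps in repo_deps:
--         all_dependencies.update(deps.keys())
--
--     # For each dependency, check versions across repos
--     mismatches = {}
--
--     for dependency in all_dependencies:
--         # Collect versions of this dependency across repos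
--         versions_by_repo = {}
--
--         for repo_name, deps in repo_deps:
--             if dependency in deps:
--                 version = deps[dependency]
--                 if version not in versions_by_repo:
--                     versions_by_repo[version] = []
--                 versions_by_repo[version].append(repo_name)
--
--         # If more than one version exists, it's a mismatch
--         if len(versions_by_repo) > 1:
--             mismatches[dependency] = {
--                 version: repos for version, repos in versions_by_repo.items()
--             }
--
--     return mismatches
-- ===== SOURCE B (Python) =====
-- from typing import List, Dict, Tuple
--
-- def _find_mismatches(repo_deps: List[Tuple[str, Dict[str, str]]]) -> Dict[str, Dict[str, List[str]]]:
--     """Single pass over all (repo, dependency, version) entries building a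
--     dep -> version -> [repos] index, then keep the deps with >1 version."""
--     by_dep = {}
--     for repo_name, deps in repo_deps:
--         for dep, version in deps.items():
--             by_dep.setdefault(dep, {}).setdefault(version, []).append(repo_name)
--     return {dep: vmap for dep, vmap in by_dep.items() if len(vmap) > 1}
-- ===== Notes on version B (the rewrite author's own statement) =====
-- stated objective: alternative
-- what changed: Instead of collecting all dependency names and then rescanning every repo's dict once per dependency, B makes a single pass over all (repo, dep, version) entries building a dep -> version -> repos index and then filters it for deps with more than one version.
import Mathlib
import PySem

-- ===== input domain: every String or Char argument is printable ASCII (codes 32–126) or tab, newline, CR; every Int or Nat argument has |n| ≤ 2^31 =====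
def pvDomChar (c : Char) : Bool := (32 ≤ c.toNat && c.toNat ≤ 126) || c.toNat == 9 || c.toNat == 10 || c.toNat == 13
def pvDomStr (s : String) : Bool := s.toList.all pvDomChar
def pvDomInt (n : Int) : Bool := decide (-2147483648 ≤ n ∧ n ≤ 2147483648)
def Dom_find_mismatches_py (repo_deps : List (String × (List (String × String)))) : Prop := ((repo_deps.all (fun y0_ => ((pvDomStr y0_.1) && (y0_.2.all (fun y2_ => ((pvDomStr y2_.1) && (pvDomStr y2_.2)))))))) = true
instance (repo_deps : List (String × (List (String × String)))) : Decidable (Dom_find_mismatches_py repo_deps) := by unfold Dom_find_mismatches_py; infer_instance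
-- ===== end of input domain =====

-- B (alternative algorithm): instead of A's per-dependency rescans of all repos, one pass over
-- all (repo, dep, version) entries builds a dep → version → repos index, which is then filtered.

-- ===== PORT A =====
def find_mismatches_py (repo_deps : List (String × (List (String × String)))) : List (String × List (String × List String)) :=
  -- all_dependencies = set(); for _, deps in repo_deps: all_dependencies.update(deps.keys())
  let all_dependencies : PySem.Set String :=
    repo_deps.foldl (fun s p => PySem.Set.update s (PySem.Dict.keys (PySem.Dict.mk p.2))) PySem.Set.empty
  -- for dependency in all_dependencies: …
  let mismatches : PySem.Dict String (List (String × List String)) :=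
    all_dependencies.foldl (fun m dependency =>
      -- versions_by_repo = {}; for repo_name, deps in repo_deps: if dependency in deps: …
      let versions_by_repo : PySem.Dict String (List String) :=
        repo_deps.foldl (fun v p =>
          match (PySem.Dict.mk p.2).get? dependency with
          | some version =>
              -- if version not in versions_by_repo: versions_by_repo[version] = []
              let v' := if v.contains version then v else v.insert version ([] : List String)
              -- versions_by_repo[version].append(repo_name)
              v'.insert version (v'.getD version [] ++ [p.1])
          | none => v) PySem.Dict.empty
      if 1 < versions_by_repo.size then
        -- mismatches[dependency] = {version: repos for version, repos in versions_by_repo.items()}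
        m.insert dependency
          (versions_by_repo.items.foldl (fun d q => d.insert q.1 q.2)
            (PySem.Dict.empty : PySem.Dict String (List String))).items
      else m) PySem.Dict.empty
  mismatches.items

-- ===== PORT B =====
def find_mismatches_py_alt (repo_deps : List (String × (List (String × String)))) : List (String × List (String × List String)) :=
  -- by_dep = {}; for repo_name, deps in repo_deps: for dep, version in deps.items(): …
  let by_dep : PySem.Dict String (PySem.Dict String (List String)) :=
    repo_deps.foldl (fun bd p =>
      p.2.foldl (fun bd kv =>
        -- by_dep.setdefault(dep, {}).setdefault(version, []).append(repo_name):
        -- mutating through setdefault is d[k] = f(d.get(k, dflt)), i.e. Dict.modify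
        bd.modify kv.1 PySem.Dict.empty (fun vmap =>
          vmap.modify kv.2 [] (fun repos => repos ++ [p.1]))) bd) PySem.Dict.empty
  -- {dep: vmap for dep, vmap in by_dep.items() if len(vmap) > 1}
  (by_dep.items.foldl (fun m q => if 1 < q.2.size then m.insert q.1 q.2.items else m)
    (PySem.Dict.empty : PySem.Dict String (List (String × List String)))).items

-- ===== PRECONDITION & SPEC =====
-- The inner association lists stand for Python dicts, whose keys are distinct by construction;
-- Pre_ only states that well-formedness (no Python input is excluded by it).
def Pre_find_mismatches_py (repo_deps : List (String × (List (String × String)))) : Prop :=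
  ∀ p ∈ repo_deps, (p.2.map Prod.fst).Nodup
instance (repo_deps : List (String × (List (String × String)))) : Decidable (Pre_find_mismatches_py repo_deps) := by unfold Pre_find_mismatches_py; infer_instance

def pvWitness_find_mismatches_py : (List (String × (List (String × String)))) :=
  [("repo1", [("dep", "1.0"), ("other", "2.0")]), ("repo2", [("dep", "1.1")])]

def Spec_find_mismatches_py (repo_deps : List (String × (List (String × String)))) (out : List (String × List (String × List String))) : Prop := out = find_mismatches_py_alt repo_deps
instance (repo_deps : List (String × (List (String × String)))) (out : List (String × List (String × List String))) : Decidable (Spec_find_mismatches_py repo_deps out) := by unfold Spec_find_mismatches_py; infer_instance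

-- ===== CLAIM (what is proved, stated in full; the proofs are below) =====
def Claim_equal_find_mismatches_py : Prop := ∀ (repo_deps : List (String × (List (String × String)))), Dom_find_mismatches_py repo_deps → Pre_find_mismatches_py repo_deps → Spec_find_mismatches_py repo_deps (find_mismatches_py repo_deps)

-- ===== LEMMAS AND PROOFS =====

-- the canonical per-repo update of a version → repos map for a fixed dependency
def pvVStep (dep : String) (v : PySem.Dict String (List String)) (p : String × List (String × String)) : PySem.Dict String (List String) :=
  match (PySem.Dict.mk p.2).get? dep with
  | some version => v.insert version (v.getD version [] ++ [p.1])
  | none => v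

-- A's versions_by_repo for one dependency
def pvVbr (L : List (String × (List (String × String)))) (dep : String) : PySem.Dict String (List String) :=
  L.foldl (pvVStep dep) PySem.Dict.empty

-- the first-occurrence list of all dependency names
def pvKeys (L : List (String × (List (String × String)))) : List String :=
  PySem.Set.ofList (L.flatMap (fun p => p.2.map Prod.fst))

-- Python's "setdefault to []; then append" is one insert of getD ++ [r]
theorem pvSetdefault_append (v : PySem.Dict String (List String)) (ver r : String) :
    (let v' := if v.contains ver then v else v.insert ver ([] : List String)
     v'.insert ver (v'.getD ver [] ++ [r])) = v.insert ver (v.getD ver [] ++ [r]) := by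
  by_cases h : v.contains ver
  · simp [h]
  · simp only [h, if_false, Bool.false_eq_true]
    rw [PySem.Dict.getD_insert_self, PySem.Dict.insert_insert_self,
        PySem.Dict.getD_of_not_contains (h := by simpa using h)]

-- A's inner loop IS pvVStep folded
theorem pvInnerA (L : List (String × (List (String × String)))) (dep : String) :
    L.foldl (fun v p =>
      match (PySem.Dict.mk p.2).get? dep with
      | some version =>
          let v' := if v.contains version then v else v.insert version ([] : List String)
          v'.insert version (v'.getD version [] ++ [p.1])
      | none => v) PySem.Dict.empty = pvVbr L dep := by
  unfold pvVbr
  congr 1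
  funext v p
  unfold pvVStep
  cases h : (PySem.Dict.mk p.2).get? dep with
  | none => simp
  | some version => simp only; exact pvSetdefault_append v version p.1

-- A's all_dependencies set is pvKeys
theorem pvAllDeps (L : List (String × (List (String × String)))) :
    L.foldl (fun s p => PySem.Set.update s (PySem.Dict.keys (PySem.Dict.mk p.2))) PySem.Set.empty
      = pvKeys L := by
  suffices h : ∀ (s : PySem.Set String),
      L.foldl (fun s p => PySem.Set.update s (PySem.Dict.keys (PySem.Dict.mk p.2))) s
        = PySem.Set.update s (L.flatMap (fun p => p.2.map Prod.fst)) by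
    simpa [pvKeys, PySem.Set.update_empty] using h PySem.Set.empty
  induction L with
  | nil => intro s; simp [PySem.Set.update_nil]
  | cons p L ih =>
    intro s
    rw [List.foldl_cons, ih, List.flatMap_cons, PySem.Set.update_append, PySem.Dict.keys_mk]

theorem pvVbr_empty_of_not_mem (L : List (String × (List (String × String)))) (dep : String)
    (h : dep ∉ pvKeys L) : pvVbr L dep = PySem.Dict.empty := by
  induction L using List.reverseRecOn with
  | nil => rfl
  | append_singleton L p ih =>
    have hmem : dep ∉ pvKeys L ∧ dep ∉ p.2.map Prod.fst := by
      unfold pvKeys at h ⊢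
      simp only [PySem.Set.mem_ofList, List.mem_flatMap] at h ⊢
      constructor
      · rintro ⟨q, hq, hd⟩; exact h ⟨q, by simp [hq], hd⟩
      · intro hd; exact h ⟨p, by simp, hd⟩
    have hget : (PySem.Dict.mk p.2).get? dep = none := by
      rw [PySem.Dict.get?_eq_none_iff_not_mem_keys]
      simpa [PySem.Dict.keys_mk] using hmem.2
    unfold pvVbr at ih ⊢
    rw [List.foldl_append, List.foldl_cons, List.foldl_nil, ih hmem.1]
    unfold pvVStep
    rw [hget]

theorem pvVbr_keys_nodup (L : List (String × (List (String × String)))) (dep : String) :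
    (pvVbr L dep).keys.Nodup := by
  induction L using List.reverseRecOn with
  | nil => exact PySem.Dict.nodup_keys_empty
  | append_singleton L p ih =>
    unfold pvVbr at ih ⊢
    rw [List.foldl_append, List.foldl_cons, List.foldl_nil]
    unfold pvVStep
    cases (PySem.Dict.mk p.2).get? dep with
    | none => exact ih
    | some version => exact PySem.Dict.nodup_keys_insert _ _ _ ih

-- folding one repo's items into a dep-indexed map applies pvVStep at every key
theorem pvStepLemma (r : String) :
    ∀ (items : List (String × String)) (ds : List String) (g : String → PySem.Dict String (List String)),
    (items.map Prod.fst).Nodup → ds.Nodup → (∀ k, k ∉ ds → g k = PySem.Dict.empty) →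
    items.foldl (fun bd kv =>
        let vmap := bd.getD kv.1 PySem.Dict.empty
        bd.insert kv.1 (vmap.insert kv.2 (vmap.getD kv.2 [] ++ [r])))
      (PySem.Dict.mk (ds.map (fun d => (d, g d))))
    = PySem.Dict.mk ((ds ++ (items.map Prod.fst).filter (fun k => !(ds.contains k))).map
        (fun d => (d, pvVStep d (g d) (r, items)))) := by
  intro items
  induction items with
  | nil =>
    intro ds g _ _ _
    simp only [List.foldl_nil, List.map_nil, List.filter_nil, List.append_nil]
    rfl
  | cons kv rest ih =>
    intro ds g hnd hds hout
    obtain ⟨k, v⟩ := kv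
    have hkrest : k ∉ rest.map Prod.fst ∧ (rest.map Prod.fst).Nodup := by
      simpa using hnd
    have hkeys : (PySem.Dict.mk (ds.map (fun d => (d, g d)))).keys = ds := by
      simp [PySem.Dict.keys_mk, List.map_map, Function.comp_def]
    have hgetD : (PySem.Dict.mk (ds.map (fun d => (d, g d)))).getD k PySem.Dict.empty = g k := by
      by_cases hk : k ∈ ds
      · exact PySem.Dict.getD_of_mem_items _
          (show (k, g k) ∈ (ds.map (fun d => (d, g d))) from List.mem_map_of_mem hk)
          (by rw [hkeys]; exact hds) _
      · rw [PySem.Dict.getD_of_not_contains _ _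
            (by rw [PySem.Dict.contains_eq_decide_mem_keys, hkeys]; simpa using hk), hout k hk]
    have hins : (PySem.Dict.mk (ds.map (fun d => (d, g d)))).insert k
          ((g k).insert v ((g k).getD v [] ++ [r]))
        = PySem.Dict.mk ((if k ∈ ds then ds else ds ++ [k]).map (fun d =>
            (d, if d = k then (g k).insert v ((g k).getD v [] ++ [r]) else g d))) := by
      apply PySem.Dict.ext
      by_cases hk : k ∈ ds
      · rw [PySem.Dict.items_insert_of_contains _ _
            (by rw [PySem.Dict.contains_eq_decide_mem_keys, hkeys]; simpa using hk)]
        simp only [if_pos hk, List.map_map]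
        apply List.map_congr_left
        intro d _
        by_cases hdk : d = k <;> simp [hdk]
      · rw [PySem.Dict.items_insert_of_not_contains _ _
            (by rw [PySem.Dict.contains_eq_decide_mem_keys, hkeys]; simpa using hk)]
        simp only [if_neg hk, List.map_append, List.map_cons, List.map_nil]
        congr 1
        apply List.map_congr_left
        intro d hd
        have : d ≠ k := fun h => hk (h ▸ hd)
        simp [this]
    rw [List.foldl_cons]
    simp only [hgetD]
    rw [hins, ih (if k ∈ ds then ds else ds ++ [k])
        (fun d => if d = k then (g k).insert v ((g k).getD v [] ++ [r]) else g d)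
        hkrest.2
        (by by_cases hk : k ∈ ds
            · simpa [hk] using hds
            · simp only [if_neg hk]
              simp [List.nodup_append, hds]
              exact fun a ha h => hk (h ▸ ha))
        (by intro x hx
            have hxds : x ∉ ds := fun h => hx (by by_cases hk : k ∈ ds <;> simp [hk, h])
            have hxk : x ≠ k := by
              intro h; subst h
              by_cases hk : x ∈ ds
              · exact hxds hk
              · exact hx (by simp [hk])
            simp [hxk, hout x hxds])]
    have hfun : ∀ d, pvVStep d (if d = k then (g k).insert v ((g k).getD v [] ++ [r]) else g d) (r, rest)
        = pvVStep d (g d) (r, (k, v) :: rest) := by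
      intro d
      by_cases hdk : d = k
      · subst hdk
        have hnone : (PySem.Dict.mk rest).get? d = none := by
          rw [PySem.Dict.get?_eq_none_iff_not_mem_keys]
          simpa [PySem.Dict.keys_mk] using hkrest.1
        simp [pvVStep, PySem.Dict.get?_mk_cons, hnone]
      · have hg : (PySem.Dict.mk ((k, v) :: rest)).get? d = (PySem.Dict.mk rest).get? d := by
          rw [PySem.Dict.get?_mk_cons]
          simp [Ne.symm hdk]
        simp [pvVStep, hg, hdk]
    have hlist : (if k ∈ ds then ds else ds ++ [k]) ++ (rest.map Prod.fst).filter
          (fun x => !((if k ∈ ds then ds else ds ++ [k]).contains x))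
        = ds ++ (((k, v) :: rest).map Prod.fst).filter (fun x => !(ds.contains x)) := by
      by_cases hk : k ∈ ds
      · simp only [if_pos hk, List.map_cons, List.filter_cons]
        have hc : (!(ds.contains k)) = false := by simpa using hk
        rw [hc]
        simp
      · simp only [if_neg hk, List.map_cons, List.filter_cons]
        have hc : (!(ds.contains k)) = true := by simpa using hk
        rw [hc]
        rw [List.append_assoc, List.singleton_append]
        congr 2
        apply List.filter_congr
        intro x hx
        have hxk : x ≠ k := fun h => hkrest.1 (h ▸ hx)
        simp [hxk]
    rw [hlist]
    congr 1
    apply List.map_congr_left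
    intro d _
    rw [hfun d]

theorem pvKeys_append_singleton (L : List (String × (List (String × String))))
    (p : String × (List (String × String))) (h : (p.2.map Prod.fst).Nodup) :
    pvKeys (L ++ [p]) = pvKeys L ++ (p.2.map Prod.fst).filter (fun k => !((pvKeys L).contains k)) := by
  unfold pvKeys
  rw [List.flatMap_append, List.flatMap_cons, List.flatMap_nil, List.append_nil,
      PySem.Set.ofList_append, PySem.Set.update_eq_append_filter,
      PySem.Set.ofList_eq_self_of_nodup _ h]
  simp

-- B's one-pass index, characterised dependency by dependency
theorem pvByDep (L : List (String × (List (String × String)))) (hpre : ∀ p ∈ L, (p.2.map Prod.fst).Nodup) :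
    L.foldl (fun bd p =>
      p.2.foldl (fun bd kv =>
        let vmap := bd.getD kv.1 PySem.Dict.empty
        bd.insert kv.1 (vmap.insert kv.2 (vmap.getD kv.2 [] ++ [p.1]))) bd) PySem.Dict.empty
    = PySem.Dict.mk ((pvKeys L).map (fun d => (d, pvVbr L d))) := by
  induction L using List.reverseRecOn with
  | nil => rfl
  | append_singleton L p ih =>
    have hpreL : ∀ q ∈ L, (q.2.map Prod.fst).Nodup := fun q hq => hpre q (by simp [hq])
    have hp : (p.2.map Prod.fst).Nodup := hpre p (by simp)
    rw [List.foldl_append, List.foldl_cons, List.foldl_nil, ih hpreL,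
        pvStepLemma p.1 p.2 (pvKeys L) (pvVbr L) hp
          (PySem.Set.nodup_ofList _) (pvVbr_empty_of_not_mem L),
        pvKeys_append_singleton L p hp]
    congr 1
    apply List.map_congr_left
    intro d _
    have : pvVbr (L ++ [p]) d = pvVStep d (pvVbr L d) p := by
      unfold pvVbr
      rw [List.foldl_append, List.foldl_cons, List.foldl_nil]
    rw [this]

-- rebuilding a Nodup-keyed dict from its own items is the identity
theorem pvCopy (vm : PySem.Dict String (List String)) (h : vm.keys.Nodup) :
    vm.items.foldl (fun d q => d.insert q.1 q.2) (PySem.Dict.empty : PySem.Dict String (List String)) = vm := by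
  apply PySem.Dict.ext
  have := PySem.Dict.items_foldl_insert_fresh vm.items Prod.fst Prod.snd
      (PySem.Dict.empty : PySem.Dict String (List String))
      (fun a _ => by simp [PySem.Dict.contains_empty]) (by exact h)
  simpa using this

-- ===== VERDICT (by name: the statement is the Claim_ definition above) =====
theorem find_mismatches_py_spec : Claim_equal_find_mismatches_py := by
  intro repo_deps _ hpre
  unfold Spec_find_mismatches_py
  have hA : find_mismatches_py repo_deps
      = ((pvKeys repo_deps).foldl (fun m dep =>
          if 1 < (pvVbr repo_deps dep).size then m.insert dep (pvVbr repo_deps dep).items else m)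
          PySem.Dict.empty).items := by
    simp only [find_mismatches_py]
    rw [pvAllDeps]
    congr 1
    apply PySem.List.foldl_congr_mem
    intro m dep _
    rw [pvInnerA]
    by_cases h : 1 < (pvVbr repo_deps dep).size
    · simp only [if_pos h, pvCopy _ (pvVbr_keys_nodup repo_deps dep)]
    · simp only [if_neg h]
  have hB : find_mismatches_py_alt repo_deps
      = ((pvKeys repo_deps).foldl (fun m dep =>
          if 1 < (pvVbr repo_deps dep).size then m.insert dep (pvVbr repo_deps dep).items else m)
          PySem.Dict.empty).items := by
    change (((repo_deps.foldl (fun bd p =>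
        p.2.foldl (fun bd kv =>
          let vmap := bd.getD kv.1 PySem.Dict.empty
          bd.insert kv.1 (vmap.insert kv.2 (vmap.getD kv.2 [] ++ [p.1]))) bd)
        PySem.Dict.empty).items.foldl
        (fun m q => if 1 < q.2.size then m.insert q.1 q.2.items else m)
        (PySem.Dict.empty : PySem.Dict String (List (String × List String)))).items = _)
    rw [pvByDep repo_deps hpre]
    rw [show (PySem.Dict.mk ((pvKeys repo_deps).map (fun d => (d, pvVbr repo_deps d)))).items
        = (pvKeys repo_deps).map (fun d => (d, pvVbr repo_deps d)) from rfl]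
    rw [List.foldl_map]
  rw [hA, hB]
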